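-- pv_equiv track=rewrite | github.com/ohtap/ohtap | subcorpora_tool/find_subcorpora_v5.py | get_context_lists
-- ===== SOURCE A (Python) =====
-- CONTEXT_WORDS_AROUND = 50
--
-- def get_context_lists(bolded_c):
-- 	words = bolded_c.split(" ")
--
-- 	# Splits it into lists with CONTEXT_WORDS_AROUND after
-- 	start_counting = False
-- 	count = 0
-- 	curr_contexts = []
-- 	curr = [] # Stores the current context we're working on
-- 	for w in words:
-- 		if start_counting: count += 1
-- 		if "</b>" in w:
-- 			start_counting = True
-- 			count = 0
-- 		if count > CONTEXT_WORDS_AROUND: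
-- 			context = " ".join(curr)
-- 			curr_contexts.append(context)
-- 			count = 0
-- 			curr = []
-- 			start_counting = False
-- 		curr.append(w)
-- 	if len(curr) > 0:
-- 		context = " ".join(curr)
-- 		if "<b>" in context: curr_contexts.append(context)
--
-- 	start_counting = False
-- 	count = 0
-- 	final_contexts = []
-- 	for c in curr_contexts:
-- 		parts = c.split("<b>")
-- 		beg_words = parts[0].split(" ")
-- 		beg = " ".join(beg_words)
-- 		length = len(beg_words)
-- 		if length > CONTEXT_WORDS_AROUND:
-- 			beg = " ".join(beg_words[(length - CONTEXT_WORDS_AROUND + 1):])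
--
-- 		context = "...{}<b>{}...".format(beg, "<b>".join(parts[1:]))
-- 		final_contexts.append(context)
--
-- 	return final_contexts
-- ===== SOURCE B (Python) =====
-- CONTEXT_WORDS_AROUND = 50
--
-- def _fmt(c):
--     parts = c.split("<b>")
--     beg_words = parts[0].split(" ")
--     beg = " ".join(beg_words)
--     length = len(beg_words)
--     if length > CONTEXT_WORDS_AROUND:
--         beg = " ".join(beg_words[(length - CONTEXT_WORDS_AROUND + 1):])
--     return "...{}<b>{}...".format(beg, "<b>".join(parts[1:]))
--
-- def get_context_lists(bolded_c):
--     # Position arithmetic instead of a counter automaton: collect the indices of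
--     # words carrying "</b>", derive the cut points directly (a cut falls 51 words
--     # after an anchor whose next "</b>" word is more than 51 words away), then
--     # slice the word list at those cut points and format each piece.
--     words = bolded_c.split(" ")
--     n = len(words)
--     bpos = [i for i, w in enumerate(words) if "</b>" in w]
--     cuts = []
--     for p, nxt in zip(bpos, bpos[1:]):
--         if p + 51 < n and nxt > p + 51:
--             cuts.append(p + 51)
--     if bpos and bpos[-1] + 51 < n:
--         cuts.append(bpos[-1] + 51)
--     out = []
--     start = 0
--     for c in cuts:
--         out.append(_fmt(" ".join(words[start:c])))
--         start = c
--     tail = " ".join(words[start:])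
--     if "<b>" in tail:
--         out.append(_fmt(tail))
--     return out
-- ===== Notes on version B (the rewrite author's own statement) =====
-- stated objective: alternative
-- what changed: Replaces A's counter automaton (start_counting/count state stepped word by word, then a second trimming loop) by position arithmetic: B collects the indices of words containing '</b>', computes the cut points directly from gaps between consecutive such indices (a cut falls 51 words after an anchor whose next '</b>' is more than 51 words away), then slices the word list at those cuts and formats each piece.
import Mathlib
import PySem

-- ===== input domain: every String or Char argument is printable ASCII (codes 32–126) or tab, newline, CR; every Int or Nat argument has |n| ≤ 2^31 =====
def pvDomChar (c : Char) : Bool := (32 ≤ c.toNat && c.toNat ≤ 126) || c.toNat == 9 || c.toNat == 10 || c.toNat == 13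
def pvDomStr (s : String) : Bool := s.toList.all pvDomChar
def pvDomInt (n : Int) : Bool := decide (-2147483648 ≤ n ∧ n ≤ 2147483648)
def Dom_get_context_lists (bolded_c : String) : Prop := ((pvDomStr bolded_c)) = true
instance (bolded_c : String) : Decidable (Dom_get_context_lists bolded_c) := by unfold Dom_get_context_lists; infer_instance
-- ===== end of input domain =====

-- B replaces A's word-by-word counter automaton by position arithmetic: it collects the
-- indices of words containing "</b>", derives the cut points from the gaps between
-- consecutive such indices, slices the word list at the cuts and formats each piece.

-- shared trim/format step (A runs it in its second loop; B's helper _fmt is the same code):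
-- parts = c.split("<b>") is never empty and "<b>" ≠ "", so the getD defaults never fire.
def pvTrim (c : String) : String :=
  let parts := (PySem.Str.split? c "<b>").getD []
  let beg_words := (PySem.Str.split? ((PySem.List.pyGet? parts 0).getD "") " ").getD []
  let beg := PySem.Str.join " " beg_words
  let length : Int := beg_words.length
  let beg := if length > 50 then
      PySem.Str.join " " (PySem.List.slice beg_words (some (length - 50 + 1)) none)
    else beg
  PySem.Str.join "" ["...", beg, "<b>", PySem.Str.join "<b>" (PySem.List.slice parts (some 1) none), "..."]

-- ===== PORT A =====
-- state = (start_counting, count, curr_contexts, curr)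
def pvStepA (st : Bool × Int × List String × List String) (w : String) :
    Bool × Int × List String × List String :=
  let sc := st.1
  let count := st.2.1
  let ctxs := st.2.2.1
  let curr := st.2.2.2
  let count := if sc then count + 1 else count
  let sc := if PySem.Str.isIn "</b>" w then true else sc
  let count := if PySem.Str.isIn "</b>" w then 0 else count
  if count > 50 then (false, 0, ctxs ++ [PySem.Str.join " " curr], [w])
  else (sc, count, ctxs, curr ++ [w])

def get_context_lists (bolded_c : String) : List String :=
  let words := (PySem.Str.split? bolded_c " ").getD []
  let st := words.foldl pvStepA (false, 0, [], [])
  let curr := st.2.2.2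
  let curr_contexts :=
    if curr.length > 0 then
      (if PySem.Str.isIn "<b>" (PySem.Str.join " " curr)
       then st.2.2.1 ++ [PySem.Str.join " " curr] else st.2.2.1)
    else st.2.2.1
  curr_contexts.foldl (fun acc c => acc ++ [pvTrim c]) []

-- ===== PORT B =====
-- loop body of `for p, nxt in zip(bpos, bpos[1:])`
def pvStepB (n : Int) (acc : List Int) (pn : Int × Int) : List Int :=
  if pn.1 + 51 < n ∧ pn.2 > pn.1 + 51 then acc ++ [pn.1 + 51] else acc

def get_context_lists_alt (bolded_c : String) : List String :=
  let words := (PySem.Str.split? bolded_c " ").getD []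
  let n : Int := words.length
  -- bpos = [i for i, w in enumerate(words) if "</b>" in w]
  let bpos : List Int :=
    ((PySem.List.enumerate words).filter (fun iw => PySem.Str.isIn "</b>" iw.2)).map (fun iw => iw.1)
  -- for p, nxt in zip(bpos, bpos[1:]): …   (bpos[1:] = bpos.tail)
  let cuts : List Int := (bpos.zip bpos.tail).foldl (pvStepB n) []
  -- if bpos and bpos[-1] + 51 < n: cuts.append(bpos[-1] + 51)
  -- (bpos[-1] on the nonempty list is bpos.getLast?; the .getD 0 default never fires)
  let cuts : List Int :=
    if bpos.isEmpty then cuts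
    else if (bpos.getLast?.getD 0) + 51 < n then cuts ++ [bpos.getLast?.getD 0 + 51] else cuts
  -- slice words at the cut points, formatting each chunk as it is emitted
  let r := cuts.foldl (fun (acc : List String × Int) c =>
      (acc.1 ++ [pvTrim (PySem.Str.join " " (PySem.List.slice words (some acc.2) (some c)))], c))
      ([], 0)
  let tail := PySem.Str.join " " (PySem.List.slice words (some r.2) none)
  if PySem.Str.isIn "<b>" tail then r.1 ++ [pvTrim tail] else r.1

-- ===== PRECONDITION & SPEC =====
def Spec_get_context_lists (bolded_c : String) (out : List String) : Prop := out = get_context_lists_alt bolded_c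
instance (bolded_c : String) (out : List String) : Decidable (Spec_get_context_lists bolded_c out) := by unfold Spec_get_context_lists; infer_instance

-- ===== CLAIM (what is proved, stated in full; the proofs are below) =====
def Claim_equal_get_context_lists : Prop := ∀ (bolded_c : String), Dom_get_context_lists bolded_c → Spec_get_context_lists bolded_c (get_context_lists bolded_c)

-- ===== LEMMAS AND PROOFS =====

-- word i of ws contains "</b>"
def pvHas (ws : List String) (i : Nat) : Bool := PySem.Str.isIn "</b>" (ws.getD i "")

-- c is a cut point: the anchor word c-51 carries "</b>" and no word in (c-51, c] does
def pvCut (ws : List String) (c : Nat) : Bool :=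
  51 ≤ c && c < ws.length && pvHas ws (c - 51) &&
    ((List.range' (c - 50) 51).all (fun q => !pvHas ws q))

-- cut points below k, in increasing order
def pvCutsBelow (ws : List String) : Nat → List Nat
  | 0 => []
  | k + 1 => pvCutsBelow ws k ++ (if pvCut ws k then [k] else [])

-- start of the chunk open at step k (last cut below k, or 0)
def pvStart (ws : List String) : Nat → Nat
  | 0 => 0
  | k + 1 => if pvCut ws k then k else pvStart ws k

-- last index < k whose word carries "</b>"
def pvLastB (ws : List String) : Nat → Option Nat
  | 0 => none
  | k + 1 => if pvHas ws k then some k else pvLastB ws k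

def pvSCb (ws : List String) (k : Nat) : Bool :=
  match pvLastB ws k with
  | some q => decide (pvStart ws k ≤ q)
  | none => false

def pvCount (ws : List String) (k : Nat) : Int :=
  match pvLastB ws k with
  | some q => if pvStart ws k ≤ q then (k : Int) - 1 - (q : Int) else 0
  | none => 0

-- the raw (untrimmed) chunks cut out of ws by the cut list
def pvChunks (ws : List String) (cuts : List Nat) : List String × Nat :=
  cuts.foldl (fun acc c =>
    (acc.1 ++ [PySem.Str.join " " ((ws.drop acc.2).take (c - acc.2))], c)) ([], 0)

theorem pvCut_iff (ws : List String) (c : Nat) :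
    pvCut ws c = true ↔ 51 ≤ c ∧ c < ws.length ∧ pvHas ws (c - 51) = true ∧
      ∀ q, c - 51 < q → q ≤ c → pvHas ws q = false := by
  simp only [pvCut, Bool.and_eq_true, decide_eq_true_eq, List.all_eq_true,
    List.mem_range'_1, Bool.not_eq_eq_eq_not, Bool.not_true]
  constructor
  · rintro ⟨⟨⟨h51, hlt⟩, hB⟩, hall⟩
    exact ⟨h51, hlt, hB, fun q hq1 hq2 => hall q ⟨by omega, by omega⟩⟩
  · rintro ⟨h51, hlt, hB, hall⟩
    exact ⟨⟨⟨h51, hlt⟩, hB⟩, fun q hq => hall q (by omega) (by omega)⟩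

theorem pvLastB_some (ws : List String) (k q : Nat) (h : pvLastB ws k = some q) :
    q < k ∧ pvHas ws q = true ∧ ∀ j, q < j → j < k → pvHas ws j = false := by
  induction k with
  | zero => simp [pvLastB] at h
  | succ k ih =>
    by_cases hB : pvHas ws k = true
    · simp [pvLastB, hB] at h
      subst h
      exact ⟨by omega, hB, fun j h1 h2 => by omega⟩
    · simp [pvLastB, hB] at h
      obtain ⟨h1, h2, h3⟩ := ih h
      refine ⟨by omega, h2, fun j hj1 hj2 => ?_⟩
      rcases Nat.lt_succ_iff_lt_or_eq.mp hj2 with h' | h'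
      · exact h3 j hj1 h'
      · subst h'; simpa using hB
  
theorem pvLastB_none (ws : List String) (k : Nat) (h : pvLastB ws k = none) :
    ∀ j, j < k → pvHas ws j = false := by
  induction k with
  | zero => omega
  | succ k ih =>
    by_cases hB : pvHas ws k = true
    · simp [pvLastB, hB] at h
    · simp [pvLastB, hB] at h
      intro j hj
      rcases Nat.lt_succ_iff_lt_or_eq.mp hj with h' | h'
      · exact ih h j h'
      · subst h'; simpa using hB

theorem pvStart_le (ws : List String) (k : Nat) : pvStart ws k ≤ k := by
  induction k with
  | zero => simp [pvStart]
  | succ k ih =>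
    unfold pvStart
    split <;> omega

theorem pvStart_max (ws : List String) (k c : Nat) (hc : c < k) (hcut : pvCut ws c = true) :
    c ≤ pvStart ws k := by
  induction k with
  | zero => omega
  | succ k ih =>
    unfold pvStart
    split
    · omega
    · rcases Nat.lt_succ_iff_lt_or_eq.mp hc with h | h
      · exact ih h
      · subst h; simp_all

theorem pvStart_cut (ws : List String) (k : Nat) :
    pvStart ws k = 0 ∨ (pvCut ws (pvStart ws k) = true ∧ pvStart ws k < k) := by
  induction k with
  | zero => left; simp [pvStart]
  | succ k ih =>
    unfold pvStart
    split
    · right; exact ⟨by assumption, by omega⟩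
    · rcases ih with h | ⟨h1, h2⟩
      · left; exact h
      · right; exact ⟨h1, by omega⟩

theorem pvChunks_snd (ws : List String) (k : Nat) :
    (pvChunks ws (pvCutsBelow ws k)).2 = pvStart ws k := by
  have key : ∀ (cuts : List Nat) (acc : List String × Nat),
      (cuts.foldl (fun acc c =>
        (acc.1 ++ [PySem.Str.join " " ((ws.drop acc.2).take (c - acc.2))], c)) acc).2
        = cuts.getLast?.getD acc.2 := by
    intro cuts
    induction cuts with
    | nil => intro acc; simp
    | cons c t ih => intro acc; simp [ih, List.getLast?_cons]
  induction k with
  | zero => simp [pvCutsBelow, pvStart, pvChunks]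
  | succ k ih =>
    unfold pvCutsBelow pvStart pvChunks
    split
    · simp [pvChunks, key]
    · simpa [pvChunks, key] using ih


theorem pv_take_snoc (ws : List String) (S k : Nat) (hS : S ≤ k) (hk : k < ws.length) :
    (ws.drop S).take (k - S) ++ [ws[k]] = (ws.drop S).take (k + 1 - S) := by
  have h1 : k - S < (ws.drop S).length := by simp; omega
  rw [show k + 1 - S = (k - S) + 1 by omega, List.take_add_one]
  simp [List.getElem?_eq_getElem h1]
  congr 1; omega

theorem pv_drop_take_one (ws : List String) (k : Nat) (hk : k < ws.length) :
    (ws.drop k).take 1 = [ws[k]] := by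
  simp [List.take_one, List.head?_drop, List.getElem?_eq_getElem hk]

theorem pvCut_of_hasB (ws : List String) (k : Nat) (h : pvHas ws k = true) :
    pvCut ws k = false := by
  cases hc : pvCut ws k with
  | false => rfl
  | true =>
    obtain ⟨h51, _, _, hall⟩ := (pvCut_iff ws k).mp hc
    exact absurd h (by simp [hall k (by omega) (le_refl k)])

-- evaluation of one automaton step, by shape
theorem pvStepA_hasB (sc : Bool) (cnt : Int) (ctxs curr : List String) (w : String)
    (h : PySem.Str.isIn "</b>" w = true) :
    pvStepA (sc, cnt, ctxs, curr) w = (true, 0, ctxs, curr ++ [w]) := by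
  simp only [pvStepA]; rw [h]; simp

theorem pvStepA_idle (ctxs curr : List String) (w : String)
    (h : PySem.Str.isIn "</b>" w = false) :
    pvStepA (false, 0, ctxs, curr) w = (false, 0, ctxs, curr ++ [w]) := by
  simp only [pvStepA]; rw [h]; simp

theorem pvStepA_count (cnt : Int) (ctxs curr : List String) (w : String)
    (h : PySem.Str.isIn "</b>" w = false) (hc : ¬ (cnt + 1 > 50)) :
    pvStepA (true, cnt, ctxs, curr) w = (true, cnt + 1, ctxs, curr ++ [w]) := by
  simp only [pvStepA]; rw [h]; simp [hc]

theorem pvStepA_flush (cnt : Int) (ctxs curr : List String) (w : String)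
    (h : PySem.Str.isIn "</b>" w = false) (hc : cnt + 1 > 50) :
    pvStepA (true, cnt, ctxs, curr) w =
      (false, 0, ctxs ++ [PySem.Str.join " " curr], [w]) := by
  simp only [pvStepA]; rw [h]; simp [hc]

-- the loop invariant of A's first pass: after k words the automaton state is
-- determined by the cut points and the last "</b>" position below k
theorem pvInv (ws : List String) (k : Nat) (hk : k ≤ ws.length) :
    (ws.take k).foldl pvStepA (false, 0, [], []) =
      (pvSCb ws k, pvCount ws k, (pvChunks ws (pvCutsBelow ws k)).1,
       (ws.drop (pvStart ws k)).take (k - pvStart ws k)) := by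
  induction k with
  | zero => simp [pvSCb, pvCount, pvLastB, pvCutsBelow, pvChunks, pvStart]
  | succ k ih =>
    have hklt : k < ws.length := by omega
    have htake : ws.take (k+1) = ws.take k ++ [ws[k]] := by
      rw [List.take_add_one]; simp [List.getElem?_eq_getElem hklt]
    rw [htake, List.foldl_append, ih (by omega), List.foldl_cons, List.foldl_nil]
    have hW : pvHas ws k = PySem.Str.isIn "</b>" ws[k] := by
      unfold pvHas; rw [List.getD_eq_getElem ws "" hklt]
    have hSle := pvStart_le ws k
    by_cases hB : pvHas ws k = true
    · -- word k carries "</b>": counter resets, no flush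
      have hcut : pvCut ws k = false := pvCut_of_hasB ws k hB
      have hL1 : pvLastB ws (k+1) = some k := by simp [pvLastB, hB]
      have hSt1 : pvStart ws (k+1) = pvStart ws k := by simp [pvStart, hcut]
      have hCu1 : pvCutsBelow ws (k+1) = pvCutsBelow ws k := by
        simp [pvCutsBelow, hcut]
      rw [pvStepA_hasB _ _ _ _ _ (hW ▸ hB)]
      simp only [pvSCb, pvCount, hL1, hSt1, hCu1, Prod.mk.injEq]
      refine ⟨by simp [hSle], by rw [if_pos hSle]; push_cast; omega, trivial,
        pv_take_snoc ws _ k hSle hklt⟩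
    · have hBf : pvHas ws k = false := by simpa using hB
      have hL1 : pvLastB ws (k+1) = pvLastB ws k := by simp [pvLastB, hBf]
      cases hq : pvLastB ws k with
      | none =>
        -- never counting yet: nothing changes
        have hnoB := pvLastB_none ws k hq
        have hcut : pvCut ws k = false := by
          cases hc : pvCut ws k with
          | false => rfl
          | true =>
            obtain ⟨h51, _, hB51, _⟩ := (pvCut_iff ws k).mp hc
            exact absurd hB51 (by simp [hnoB (k-51) (by omega)])
        have hSt1 : pvStart ws (k+1) = pvStart ws k := by simp [pvStart, hcut]
        have hCu1 : pvCutsBelow ws (k+1) = pvCutsBelow ws k := by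
          simp [pvCutsBelow, hcut]
        rw [show pvSCb ws k = false from by simp [pvSCb, hq],
          show pvCount ws k = 0 from by simp [pvCount, hq],
          pvStepA_idle _ _ _ (hW ▸ hBf)]
        simp only [pvSCb, pvCount, hL1, hq, hSt1, hCu1, Prod.mk.injEq]
        exact ⟨trivial, trivial, trivial, pv_take_snoc ws _ k hSle hklt⟩
      | some q =>
        obtain ⟨hq1, hq2, hq3⟩ := pvLastB_some ws k q hq
        by_cases hsc : pvStart ws k ≤ q
        · -- counting
          have hle : k ≤ q + 51 := by
            by_contra hgt
            have hcutq : pvCut ws (q+51) = true := by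
              refine (pvCut_iff ws (q+51)).mpr ⟨by omega, by omega, ?_, ?_⟩
              · simpa [show q + 51 - 51 = q by omega] using hq2
              · intro j hj1 hj2
                exact hq3 j (by omega) (by omega)
            have := pvStart_max ws k (q+51) (by omega) hcutq
            omega
          rw [show pvSCb ws k = true from by simp [pvSCb, hq, hsc],
            show pvCount ws k = (k:Int) - 1 - (q:Int) from by simp [pvCount, hq, hsc]]
          by_cases hlt : k < q + 51
          · -- still counting, no flush
            have hcut : pvCut ws k = false := by
              cases hc : pvCut ws k with
              | false => rfl
              | true =>
                obtain ⟨h51, _, _, hall⟩ := (pvCut_iff ws k).mp hc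
                exact absurd hq2 (by simp [hall q (by omega) (by omega)])
            have hSt1 : pvStart ws (k+1) = pvStart ws k := by simp [pvStart, hcut]
            have hCu1 : pvCutsBelow ws (k+1) = pvCutsBelow ws k := by
              simp [pvCutsBelow, hcut]
            rw [pvStepA_count _ _ _ _ (hW ▸ hBf) (by push_cast; omega)]
            simp only [pvSCb, pvCount, hL1, hq, hSt1, hCu1, Prod.mk.injEq]
            refine ⟨by simp [hsc], by rw [if_pos hsc]; push_cast; omega, trivial,
              pv_take_snoc ws _ k hSle hklt⟩
          · -- k = q + 51 : flush
            have hkq : k = q + 51 := by omega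
            have hcut : pvCut ws k = true := by
              refine (pvCut_iff ws k).mpr ⟨by omega, hklt, ?_, ?_⟩
              · simpa [show k - 51 = q by omega] using hq2
              · intro j hj1 hj2
                rcases Nat.lt_or_ge j k with h' | h'
                · exact hq3 j (by omega) h'
                · have hjk : j = k := by omega
                  subst hjk; exact hBf
            have hSt1 : pvStart ws (k+1) = k := by simp [pvStart, hcut]
            have hchunk : pvChunks ws (pvCutsBelow ws (k+1)) =
                ((pvChunks ws (pvCutsBelow ws k)).1 ++
                  [PySem.Str.join " " ((ws.drop (pvStart ws k)).take (k - pvStart ws k))], k) := by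
              have h2 := pvChunks_snd ws k
              simp only [pvCutsBelow, hcut, if_true, pvChunks, List.foldl_append,
                List.foldl_cons, List.foldl_nil]
              rw [show (pvCutsBelow ws k).foldl _ (([] : List String), 0) =
                pvChunks ws (pvCutsBelow ws k) from rfl, h2]
            rw [pvStepA_flush _ _ _ _ (hW ▸ hBf) (by push_cast; omega)]
            simp only [pvSCb, pvCount, hL1, hq, hSt1, hchunk, Prod.mk.injEq]
            refine ⟨by simp; omega, by rw [if_neg (by omega)], trivial, ?_⟩
            simpa using (pv_drop_take_one ws k hklt).symm
        · -- last "</b>" lies before the chunk start: not counting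
          have hcut : pvCut ws k = false := by
            cases hc : pvCut ws k with
            | false => rfl
            | true =>
              obtain ⟨h51, _, hB51, hall⟩ := (pvCut_iff ws k).mp hc
              -- q is the last "</b>" below k, so q = k - 51
              have hq51 : q = k - 51 := by
                rcases Nat.lt_or_ge (k-51) q with h' | h'
                · exact absurd hq2 (by simp [hall q h' (by omega)])
                · rcases Nat.eq_or_lt_of_le h' with h'' | h''
                  · omega
                  · exact absurd hB51 (by simp [hq3 (k-51) h'' (by omega)])
              -- the chunk start is a cut S with q ∈ (S-51, S], contradicting pvCut S
              rcases pvStart_cut ws k with hS0 | ⟨hScut, hSlt⟩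
              · omega
              · obtain ⟨hS51, _, _, hallS⟩ := (pvCut_iff ws (pvStart ws k)).mp hScut
                exact absurd hq2 (by simp [hallS q (by omega) (by omega)])
          have hSt1 : pvStart ws (k+1) = pvStart ws k := by simp [pvStart, hcut]
          have hCu1 : pvCutsBelow ws (k+1) = pvCutsBelow ws k := by
            simp [pvCutsBelow, hcut]
          rw [show pvSCb ws k = false from by simp [pvSCb, hq, hsc],
            show pvCount ws k = 0 from by simp [pvCount, hq, hsc],
            pvStepA_idle _ _ _ (hW ▸ hBf)]
          simp only [pvSCb, pvCount, hL1, hq, hSt1, hCu1, Prod.mk.injEq]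
          refine ⟨by simp [hsc], by rw [if_neg hsc], trivial,
            pv_take_snoc ws _ k hSle hklt⟩

-- ===== B-side characterization =====

-- positions of the words that carry "</b>"
def pvBpos (ws : List String) : List Nat := (List.range ws.length).filter (pvHas ws)

-- the Nat-level value of B's cut-point computation
def pvCutsOf (ws : List String) : List Nat :=
  ((((pvBpos ws).zip (pvBpos ws).tail).filter
      (fun pn => decide (pn.1 + 51 < ws.length ∧ pn.2 > pn.1 + 51))).map (fun pn => pn.1 + 51))
  ++ (((pvBpos ws).getLast?).elim [] (fun p => if p + 51 < ws.length then [p + 51] else []))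

theorem pvBpos_mem (ws : List String) (q : Nat) :
    q ∈ pvBpos ws ↔ q < ws.length ∧ pvHas ws q = true := by
  simp [pvBpos, List.mem_filter, List.mem_range, and_comm]

theorem pvBpos_pairwise (ws : List String) : (pvBpos ws).Pairwise (· < ·) :=
  List.Pairwise.sublist List.filter_sublist List.pairwise_lt_range

theorem pvCutsBelow_eq (ws : List String) (k : Nat) :
    pvCutsBelow ws k = (List.range k).filter (pvCut ws) := by
  induction k with
  | zero => simp [pvCutsBelow]
  | succ k ih =>
    rw [List.range_succ, List.filter_append]
    unfold pvCutsBelow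
    rw [ih]
    cases h : pvCut ws k <;> simp [h]

theorem pvCut_lt_len (ws : List String) (c : Nat) (h : pvCut ws c = true) : c < ws.length :=
  ((pvCut_iff ws c).mp h).2.1

theorem pvCutsBelow_mem (ws : List String) (c : Nat) :
    c ∈ pvCutsBelow ws ws.length ↔ pvCut ws c = true := by
  rw [pvCutsBelow_eq]
  simp only [List.mem_filter, List.mem_range]
  exact ⟨fun h => h.2, fun h => ⟨pvCut_lt_len ws c h, h⟩⟩

theorem pvCutsBelow_pairwise (ws : List String) :
    (pvCutsBelow ws ws.length).Pairwise (· < ·) := by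
  rw [pvCutsBelow_eq]
  exact List.Pairwise.sublist List.filter_sublist List.pairwise_lt_range

theorem pvCutsOf_mem (ws : List String) (c : Nat) :
    c ∈ pvCutsOf ws ↔ pvCut ws c = true := by
  have hmono : ∀ i j (hi : i < (pvBpos ws).length) (hj : j < (pvBpos ws).length),
      i < j → (pvBpos ws)[i] < (pvBpos ws)[j] :=
    fun i j hi hj hij => List.pairwise_iff_getElem.mp (pvBpos_pairwise ws) i j hi hj hij
  have hL : ∀ i (h : i < (pvBpos ws).length),
      (pvBpos ws)[i] < ws.length ∧ pvHas ws (pvBpos ws)[i] = true :=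
    fun i h => (pvBpos_mem ws _).mp (List.mem_iff_getElem.mpr ⟨i, h, rfl⟩)
  have hzlen : ((pvBpos ws).zip (pvBpos ws).tail).length = (pvBpos ws).length - 1 := by
    simp [List.length_zip]
  have hzget : ∀ i (h : i < (pvBpos ws).length - 1),
      ∃ (h1 : i < ((pvBpos ws).zip (pvBpos ws).tail).length)
        (h2 : i < (pvBpos ws).length) (h3 : i + 1 < (pvBpos ws).length),
      ((pvBpos ws).zip (pvBpos ws).tail)[i] = ((pvBpos ws)[i], (pvBpos ws)[i+1]) := by
    intro i h
    refine ⟨by omega, by omega, by omega, ?_⟩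
    rw [List.getElem_zip, List.getElem_tail]
  constructor
  · intro hc
    rw [pvCutsOf, List.mem_append] at hc
    rcases hc with hc | hc
    · -- from an adjacent pair
      simp only [List.mem_map, List.mem_filter, decide_eq_true_eq] at hc
      obtain ⟨pn, ⟨hpn, hcond1, hcond2⟩, heq⟩ := hc
      obtain ⟨i, hi, hpneq⟩ := List.mem_iff_getElem.mp hpn
      have hi' : i < (pvBpos ws).length - 1 := by omega
      obtain ⟨h1, h2, h3, hget⟩ := hzget i hi'
      rw [hget] at hpneq
      obtain ⟨hp1, hp2⟩ : pn.1 = (pvBpos ws)[i] ∧ pn.2 = (pvBpos ws)[i+1] := by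
        rw [← hpneq]; exact ⟨rfl, rfl⟩
      refine (pvCut_iff ws c).mpr ⟨by omega, by omega, ?_, ?_⟩
      · have := (hL i h2).2
        rw [show c - 51 = pn.1 by omega, hp1]
        exact this
      · intro j hj1 hj2
        by_contra hB
        have hjmem : j ∈ pvBpos ws := (pvBpos_mem ws j).mpr ⟨by omega, by simpa using hB⟩
        obtain ⟨m, hm, hmeq⟩ := List.mem_iff_getElem.mp hjmem
        rcases Nat.lt_or_ge i m with h' | h'
        · have hle : (pvBpos ws)[i+1] ≤ (pvBpos ws)[m] := by
            rcases Nat.eq_or_lt_of_le (Nat.succ_le_of_lt h') with h'' | h''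
            · exact Nat.le_of_eq (by congr 1 <;> omega)
            · exact Nat.le_of_lt (hmono (i+1) m h3 hm h'')
          omega
        · have hle : (pvBpos ws)[m] ≤ (pvBpos ws)[i] := by
            rcases Nat.eq_or_lt_of_le h' with h'' | h''
            · exact Nat.le_of_eq (by congr 1 <;> omega)
            · exact Nat.le_of_lt (hmono m i hm h2 h'')
          omega
    · -- from the last anchor
      rcases hlast : (pvBpos ws).getLast? with _ | p
      · rw [hlast] at hc
        simp at hc
      · rw [hlast] at hc
        have hplen : (pvBpos ws).length - 1 < (pvBpos ws).length := by
          cases hL0 : (pvBpos ws) with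
          | nil => rw [hL0] at hlast; simp at hlast
          | cons a t => simp only [List.length_cons]; omega
        have hpeq : p = (pvBpos ws)[(pvBpos ws).length - 1] := by
          rw [List.getLast?_eq_getElem?, List.getElem?_eq_getElem hplen] at hlast
          simpa using hlast.symm
        by_cases hn : p + 51 < ws.length
        · simp [hn] at hc
          subst hc
          refine (pvCut_iff ws (p+51)).mpr ⟨by omega, by omega, ?_, ?_⟩
          · rw [show p + 51 - 51 = p by omega, hpeq]
            exact (hL _ hplen).2
          · intro j hj1 hj2
            by_contra hB
            have hjmem : j ∈ pvBpos ws := (pvBpos_mem ws j).mpr ⟨by omega, by simpa using hB⟩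
            obtain ⟨m, hm, hmeq⟩ := List.mem_iff_getElem.mp hjmem
            have : j ≤ p := by
              rcases Nat.eq_or_lt_of_le (by omega : m ≤ (pvBpos ws).length - 1) with h'' | h''
              · rw [← hmeq, hpeq]
                exact Nat.le_of_eq (by congr 1 <;> omega)
              · have := hmono m _ hm hplen h''
                rw [hpeq]; omega
            omega
        · simp [hn] at hc
  · intro hc
    obtain ⟨h51, hlen, hB51, hall⟩ := (pvCut_iff ws c).mp hc
    have hpmem : c - 51 ∈ pvBpos ws := (pvBpos_mem ws _).mpr ⟨by omega, hB51⟩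
    obtain ⟨i, hi, hieq⟩ := List.mem_iff_getElem.mp hpmem
    rw [pvCutsOf, List.mem_append]
    rcases Nat.lt_or_ge (i+1) (pvBpos ws).length with hnext | hnext
    · -- an adjacent pair exists
      left
      obtain ⟨h1, h2, h3, hget⟩ := hzget i (by omega)
      have hnextB := hL (i+1) hnext
      have hgt : (pvBpos ws)[i+1] > c - 51 + 51 := by
        by_contra hle
        have := hmono i (i+1) h2 h3 (by omega)
        have hBi1 := hall (pvBpos ws)[i+1] (by omega) (by omega)
        rw [hnextB.2] at hBi1
        simp at hBi1
      simp only [List.mem_map, List.mem_filter, decide_eq_true_eq]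
      refine ⟨((pvBpos ws)[i], (pvBpos ws)[i+1]), ⟨?_, by omega, by omega⟩, by omega⟩
      exact List.mem_iff_getElem.mpr ⟨i, h1, hget⟩
    · -- c-51 is the last anchor
      right
      have hieq' : i = (pvBpos ws).length - 1 := by omega
      have hlast : (pvBpos ws).getLast? = some (c - 51) := by
        rw [List.getLast?_eq_getElem?, List.getElem?_eq_getElem (by omega : (pvBpos ws).length - 1 < (pvBpos ws).length)]
        have h0 : (pvBpos ws)[(pvBpos ws).length - 1]'(by omega) = c - 51 := by
          rw [← hieq]; congr 1 <;> omega
        rw [h0]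
      rw [hlast]
      simp [show c - 51 + 51 < ws.length by omega]
      omega

theorem pvCutsOf_pairwise (ws : List String) : (pvCutsOf ws).Pairwise (· < ·) := by
  have hmono : ∀ i j (hi : i < (pvBpos ws).length) (hj : j < (pvBpos ws).length),
      i < j → (pvBpos ws)[i] < (pvBpos ws)[j] :=
    fun i j hi hj hij => List.pairwise_iff_getElem.mp (pvBpos_pairwise ws) i j hi hj hij
  have hzp : ((pvBpos ws).zip (pvBpos ws).tail).Pairwise (fun a b => a.1 < b.1) := by
    rw [List.pairwise_iff_getElem]
    intro i j hi hj hij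
    rw [List.getElem_zip, List.getElem_zip]
    exact hmono i j (by simp [List.length_zip] at hi; omega)
      (by simp [List.length_zip] at hj; omega) hij
  rw [pvCutsOf, List.pairwise_append]
  refine ⟨?_, ?_, ?_⟩
  · exact (hzp.sublist List.filter_sublist).map (fun pn : Nat × Nat => pn.1 + 51) (fun a b h => Nat.add_lt_add_right h 51)
  · cases (pvBpos ws).getLast? with
    | none => exact List.Pairwise.nil
    | some p => by_cases h : p + 51 < ws.length <;> simp [h]
  · intro x hx y hy
    simp only [List.mem_map, List.mem_filter, decide_eq_true_eq] at hx
    obtain ⟨pn, ⟨hpn, _, _⟩, hxeq⟩ := hx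
    obtain ⟨i, hi, hpneq⟩ := List.mem_iff_getElem.mp hpn
    rcases hlast : (pvBpos ws).getLast? with _ | p
    · rw [hlast] at hy
      simp at hy
    · rw [hlast] at hy
      have hplen : (pvBpos ws).length - 1 < (pvBpos ws).length := by
        cases hL0 : (pvBpos ws) with
        | nil => rw [hL0] at hlast; simp at hlast
        | cons a t => simp only [List.length_cons]; omega
      have hpeq : p = (pvBpos ws)[(pvBpos ws).length - 1] := by
        rw [List.getLast?_eq_getElem?, List.getElem?_eq_getElem hplen] at hlast
        simpa using hlast.symm
      have hy' : y = p + 51 := by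
        by_cases hn : p + 51 < ws.length
        · simpa [hn] using hy
        · simp [hn] at hy
      have hilen : i < ((pvBpos ws).zip (pvBpos ws).tail).length := hi
      have hi2 : i < (pvBpos ws).length := by simp [List.length_zip] at hilen; omega
      have hi3 : i + 1 < (pvBpos ws).length := by simp [List.length_zip] at hilen; omega
      have : pn.1 = (pvBpos ws)[i] := by
        rw [← hpneq, List.getElem_zip]
      have := hmono i ((pvBpos ws).length - 1) hi2 hplen (by omega)
      omega

theorem pvCutsOf_eq (ws : List String) : pvCutsOf ws = pvCutsBelow ws ws.length := by
  have h1 := pvCutsOf_pairwise ws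
  have h2 := pvCutsBelow_pairwise ws
  refine List.eq_of_perm_of_sorted (fun a b _ _ hab hba => by omega) h1 h2 ?_
  refine (List.perm_ext_iff_of_nodup (h1.imp ?_) (h2.imp ?_)).mpr ?_
  · intro a b h; omega
  · intro a b h; omega
  · intro c
    rw [pvCutsOf_mem, pvCutsBelow_mem]

-- ===== bridging B's Int-level port to the Nat-level characterization =====

theorem pvEnumFilter (ws : List String) (s : Int) :
    ((PySem.List.enumerate ws s).filter (fun iw => PySem.Str.isIn "</b>" iw.2)).map (fun iw => iw.1)
      = ((List.range ws.length).filter (pvHas ws)).map (fun (j : Nat) => s + (j : Int)) := by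
  induction ws generalizing s with
  | nil => simp [PySem.List.enumerate]
  | cons w t ih =>
    have hfun : pvHas (w :: t) ∘ Nat.succ = pvHas t := by
      funext j; simp [pvHas]
    have hhead : pvHas (w :: t) 0 = PySem.Str.isIn "</b>" w := by
      simp [pvHas]
    have harith : (fun (j : Nat) => s + ((Nat.succ j : Nat) : Int)) = (fun (j : Nat) => (s + 1) + (j : Int)) :=
      funext fun j => by push_cast; ring
    simp only [PySem.List.enumerate_cons, List.length_cons, List.range_succ_eq_map,
      List.filter_cons, List.filter_map, hfun, hhead, ih, List.map_cons, List.map_map,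
      Function.comp_def, Nat.succ_eq_add_one]
    have harith' : (fun (j : Nat) => s + (((j + 1 : Nat) : Nat) : Int)) = (fun (j : Nat) => (s + 1) + (j : Int)) :=
      funext fun j => by push_cast; ring
    by_cases hw : PySem.Str.isIn "</b>" w = true
    · simp only [hw, if_true, List.map_cons, List.map_map, ih, Function.comp_def,
        Nat.succ_eq_add_one, harith', Nat.cast_zero, add_zero]
    · simp only [hw, Bool.false_eq_true, if_false, List.map_map, ih, Function.comp_def,
        Nat.succ_eq_add_one, harith']

theorem pvFoldB (n : Int) (pairs : List (Nat × Nat)) (acc : List Nat) :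
    (pairs.map (fun (pn : Nat × Nat) => ((pn.1 : Int), (pn.2 : Int)))).foldl (pvStepB n) (acc.map (fun (c : Nat) => (c : Int)))
      = (pairs.foldl (fun a pn =>
          if (pn.1 : Int) + 51 < n ∧ (pn.2 : Int) > (pn.1 : Int) + 51 then a ++ [pn.1 + 51] else a)
          acc).map (fun (c : Nat) => (c : Int)) := by
  induction pairs generalizing acc with
  | nil => simp
  | cons pn t ih =>
    simp only [List.map_cons, List.foldl_cons, pvStepB]
    by_cases h : (pn.1 : Int) + 51 < n ∧ (pn.2 : Int) > (pn.1 : Int) + 51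
    · rw [if_pos h, if_pos h,
        show (acc.map (fun (c : Nat) => (c : Int))) ++ [(pn.1 : Int) + 51]
          = (acc ++ [pn.1 + 51]).map (fun (c : Nat) => (c : Int)) by simp]
      exact ih (acc ++ [pn.1 + 51])
    · rw [if_neg h, if_neg h]
      exact ih acc

theorem pvChunkFold (ws : List String) (cutsN : List Nat) (acc1 : List String) (s : Nat) :
    (cutsN.map (fun (c : Nat) => (c : Int))).foldl
        (fun (acc : List String × Int) c =>
          (acc.1 ++ [pvTrim (PySem.Str.join " " (PySem.List.slice ws (some acc.2) (some c)))], c))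
        (acc1.map pvTrim, (s : Int))
      = ((cutsN.foldl (fun acc c =>
            (acc.1 ++ [PySem.Str.join " " ((ws.drop acc.2).take (c - acc.2))], c)) (acc1, s)).1.map pvTrim,
         ((cutsN.foldl (fun acc c =>
            (acc.1 ++ [PySem.Str.join " " ((ws.drop acc.2).take (c - acc.2))], c)) (acc1, s)).2 : Int)) := by
  induction cutsN generalizing acc1 s with
  | nil => simp
  | cons c t ih =>
    simp only [List.map_cons, List.foldl_cons, PySem.List.slice_natCast]
    rw [show (acc1.map pvTrim) ++ [pvTrim (PySem.Str.join " " (List.take (c - s) (List.drop s ws)))]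
        = (acc1 ++ [PySem.Str.join " " (List.take (c - s) (List.drop s ws))]).map pvTrim by simp]
    exact ih _ c

theorem pvLastCast (len : Nat) (L : List Nat) (part : List Nat) :
    (if (L.map (fun (c : Nat) => (c : Int))).isEmpty then part.map (fun (c : Nat) => (c : Int))
     else if ((L.map (fun (c : Nat) => (c : Int))).getLast?.getD 0) + 51 < (len : Int)
       then part.map (fun (c : Nat) => (c : Int)) ++ [(L.map (fun (c : Nat) => (c : Int))).getLast?.getD 0 + 51]
       else part.map (fun (c : Nat) => (c : Int)))
    = (part ++ (L.getLast?.elim [] (fun p => if p + 51 < len then [p + 51] else []))).map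
        (fun (c : Nat) => (c : Int)) := by
  cases hL : L.getLast? with
  | none =>
    have hnil : L = [] := List.getLast?_eq_none_iff.mp hL
    subst hnil
    simp
  | some p =>
    have hne : L ≠ [] := by
      intro h; subst h; simp at hL
    have hmap : (L.map (fun (c : Nat) => (c : Int))).getLast? = some ((p : Nat) : Int) := by
      rw [List.getLast?_map, hL]; rfl
    rw [if_neg (by simp [hne]), hmap]
    simp only [Option.getD_some, Option.elim_some]
    by_cases hn : p + 51 < len
    · rw [if_pos (by omega), if_pos hn]
      simp
    · rw [if_neg (by omega), if_neg hn]
      simp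

theorem pvFoldNatEq (len : Nat) (pairs : List (Nat × Nat)) (acc : List Nat) :
    pairs.foldl (fun a pn =>
        if (pn.1 : Int) + 51 < (len : Int) ∧ (pn.2 : Int) > (pn.1 : Int) + 51
        then a ++ [pn.1 + 51] else a) acc
      = acc ++ (pairs.filter (fun pn => decide (pn.1 + 51 < len ∧ pn.2 > pn.1 + 51))).map
          (fun pn => pn.1 + 51) := by
  induction pairs generalizing acc with
  | nil => simp
  | cons pn t ih =>
    simp only [List.foldl_cons, List.filter_cons]
    by_cases h : pn.1 + 51 < len ∧ pn.2 > pn.1 + 51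
    · rw [if_pos (by omega)]
      simp [h, ih]
    · rw [if_neg (by omega)]
      simp [h, ih]

-- ===== VERDICT (by name: the statement is the Claim_ definition above) =====
theorem get_context_lists_spec : Claim_equal_get_context_lists := by
  intro bolded_c _
  unfold Spec_get_context_lists
  show get_context_lists bolded_c = get_context_lists_alt bolded_c
  simp only [get_context_lists, get_context_lists_alt]
  generalize (PySem.Str.split? bolded_c " ").getD [] = ws
  -- A's first loop via the invariant
  have hA := pvInv ws ws.length (le_refl _)
  rw [List.take_length] at hA
  rw [hA, PySem.List.foldl_append_singleton_eq_map, List.nil_append]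
  have hSle := pvStart_le ws ws.length
  have hcurr : (ws.drop (pvStart ws ws.length)).take (ws.length - pvStart ws ws.length)
      = ws.drop (pvStart ws ws.length) :=
    List.take_of_length_le (by simp)
  rw [hcurr]
  dsimp only
  -- B's bpos
  rw [pvEnumFilter ws 0,
    show (fun (j : Nat) => (0 : Int) + (j : Int)) = (fun (j : Nat) => (j : Int)) from
      funext fun j => by ring,
    show (List.range ws.length).filter (pvHas ws) = pvBpos ws from rfl]
  -- B's zip and first cuts loop
  rw [← List.map_tail, List.zip_map,
    show (Prod.map (fun (q : Nat) => (q : Int)) (fun (q : Nat) => (q : Int)))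
        = (fun (pn : Nat × Nat) => ((pn.1 : Int), (pn.2 : Int))) from funext fun pn => rfl]
  have hfb := pvFoldB (ws.length : Int) ((pvBpos ws).zip (pvBpos ws).tail) []
  simp only [List.map_nil] at hfb
  rw [hfb, pvFoldNatEq, List.nil_append]
  -- B's trailing cut
  rw [pvLastCast ws.length (pvBpos ws)]
  rw [show ((((pvBpos ws).zip (pvBpos ws).tail).filter
        (fun pn => decide (pn.1 + 51 < ws.length ∧ pn.2 > pn.1 + 51))).map (fun pn => pn.1 + 51)
      ++ (((pvBpos ws).getLast?).elim [] (fun p => if p + 51 < ws.length then [p + 51] else [])))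
      = pvCutsOf ws from rfl, pvCutsOf_eq]
  -- B's slicing loop
  have hcf := pvChunkFold ws (pvCutsBelow ws ws.length) [] 0
  simp only [List.map_nil, Nat.cast_zero] at hcf
  rw [hcf]
  rw [show (pvCutsBelow ws ws.length).foldl (fun acc c =>
        (acc.1 ++ [PySem.Str.join " " ((ws.drop acc.2).take (c - acc.2))], c)) ([], 0)
      = pvChunks ws (pvCutsBelow ws ws.length) from rfl]
  rw [pvChunks_snd ws ws.length, PySem.List.slice_from_natCast]
  -- final guard analysis
  by_cases h0 : (ws.drop (pvStart ws ws.length)).length = 0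
  · have hnil : ws.drop (pvStart ws ws.length) = [] := List.length_eq_zero_iff.mp h0
    rw [hnil]
    rw [if_neg (by simp)]
    rw [if_neg (by decide)]
  · rw [if_pos (by omega)]
    by_cases hin : PySem.Str.isIn "<b>"
        (PySem.Str.join " " (ws.drop (pvStart ws ws.length))) = true
    · rw [if_pos hin, if_pos hin, List.map_append, List.map_singleton]
    · rw [if_neg (by simpa using hin), if_neg (by simpa using hin)]
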